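-- pv_equiv track=rewrite | github.com/SeleznevAS-dev/28-tasks | tasks/task_13.py | UFO
-- ===== SOURCE A (Python) =====
-- def UFO(N: int, data: list[int], octal: bool) -> list[int]:
--     number_system = 8 if octal else 16
--     ans = []
--     for i in range(N):
--         sm = 0
--         number = str(data[i])
--         for index, element in enumerate(number[::-1]):
--             sm += int(element) * number_system**index
--         ans.append(sm)
--     return ans
-- ===== SOURCE B (Python) =====
-- def UFO(N: int, data: list[int], octal: bool) -> list[int]:
--     base = 8 if octal else 16
--
--     def reread(n: int) -> int:
--         sm = 0
--         for ch in str(n):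
--             sm = sm * base + int(ch)
--         return sm
--
--     return [reread(data[i]) for i in range(N)]
-- ===== Notes on version B (the rewrite author's own statement) =====
-- stated objective: simpler
-- what changed: B evaluates each decimal string as a base-8/16 numeral with a left-to-right Horner accumulator (sm = sm*base + digit), removing A's string reversal, enumerate and per-digit exponentiation, and builds the result with a comprehension instead of append.
import Mathlib
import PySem

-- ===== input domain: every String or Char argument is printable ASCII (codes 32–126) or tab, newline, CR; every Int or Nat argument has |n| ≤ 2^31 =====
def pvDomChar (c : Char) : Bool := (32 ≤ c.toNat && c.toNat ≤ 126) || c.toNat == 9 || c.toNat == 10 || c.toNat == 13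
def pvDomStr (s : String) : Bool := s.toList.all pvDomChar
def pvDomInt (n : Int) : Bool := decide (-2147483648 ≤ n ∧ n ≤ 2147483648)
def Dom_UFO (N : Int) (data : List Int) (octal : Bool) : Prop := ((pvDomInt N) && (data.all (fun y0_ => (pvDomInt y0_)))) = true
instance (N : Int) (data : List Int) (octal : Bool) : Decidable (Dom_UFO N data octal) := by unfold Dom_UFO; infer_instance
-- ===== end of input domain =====

-- B replaces A's reverse/enumerate/power digit sum by a left-to-right Horner accumulator (simpler, no exponentiation).


-- ===== PORT A =====
-- int(ch) on a single character: exact on the digit chars Pre_ admits; Python raises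
-- ValueError on anything else (e.g. the '-' of a negative number), excluded by Pre_.
def pyIntChar (c : Char) : Int := (PySem.Int.ofChars? [c]).getD 0

def UFO (N : Int) (data : List Int) (octal : Bool) : List Int :=
  let number_system : Int := if octal then 8 else 16
  (PySem.List.pyRange 0 N 1).foldl (fun ans i =>
    -- data[i]: in range under Pre_; number[::-1] is the reverse (PySem.List.slice?_none_none_neg_one)
    let number := PySem.Int.toChars (PySem.List.pyGetD data i 0)
    let sm := (PySem.List.enumerate number.reverse 0).foldl
      (fun sm p => sm + pyIntChar p.2 * number_system ^ p.1.toNat) 0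
    ans ++ [sm]) []

-- ===== PORT B =====
def reread (base : Int) (cs : List Char) : Int :=
  cs.foldl (fun sm c => sm * base + pyIntChar c) 0

def UFO_alt (N : Int) (data : List Int) (octal : Bool) : List Int :=
  let base : Int := if octal then 8 else 16
  (PySem.List.pyRange 0 N 1).map (fun i => reread base (PySem.Int.toChars (PySem.List.pyGetD data i 0)))

-- ===== PRECONDITION & SPEC =====
-- Pre_ excludes N > len(data) (IndexError) and negative entries among the first N (int('-') raises ValueError).
def Pre_UFO (N : Int) (data : List Int) (octal : Bool) : Prop :=
  N ≤ (data.length : Int) ∧ ∀ d ∈ data.take N.toNat, 0 ≤ d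
instance (N : Int) (data : List Int) (octal : Bool) : Decidable (Pre_UFO N data octal) := by unfold Pre_UFO; infer_instance
def pvWitness_UFO : Int × List Int × Bool := (2, [12, 34], true)

def Spec_UFO (N : Int) (data : List Int) (octal : Bool) (out : List Int) : Prop := out = UFO_alt N data octal
instance (N : Int) (data : List Int) (octal : Bool) (out : List Int) : Decidable (Spec_UFO N data octal out) := by unfold Spec_UFO; infer_instance

-- ===== CLAIM (what is proved, stated in full; the proofs are below) =====
def Claim_equal_UFO : Prop := ∀ (N : Int) (data : List Int) (octal : Bool), Dom_UFO N data octal → Pre_UFO N data octal → Spec_UFO N data octal (UFO N data octal)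

-- ===== LEMMAS AND PROOFS =====

-- Horner with an arbitrary accumulator peels off as acc * b^len.
theorem horner_acc (b : Int) (g : Char → Int) (l : List Char) (acc : Int) :
    l.foldl (fun s c => s * b + g c) acc
      = acc * b ^ l.length + l.foldl (fun s c => s * b + g c) 0 := by
  induction l generalizing acc with
  | nil => simp
  | cons x xs ih =>
    simp only [List.foldl_cons, List.length_cons]
    rw [ih (acc * b + g x), ih (0 * b + g x)]
    ring

-- A's reversed enumerate-and-power sum is B's left-to-right Horner value.
theorem sumA_eq_horner (b : Int) (g : Char → Int) (l : List Char) :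
    (PySem.List.enumerate l.reverse 0).foldl (fun s p => s + g p.2 * b ^ p.1.toNat) 0
      = l.foldl (fun s c => s * b + g c) 0 := by
  induction l with
  | nil => simp
  | cons x xs ih =>
    have hrev : (x :: xs).reverse = xs.reverse ++ [x] := by simp
    rw [hrev, PySem.List.enumerate_append, List.foldl_append, ih]
    have hlen : ((0 : Int) + (xs.reverse.length : Int)).toNat = xs.length := by simp
    simp only [PySem.List.enumerate_cons, PySem.List.enumerate_nil, List.foldl_cons,
      List.foldl_nil, hlen]
    rw [horner_acc b g xs (0 * b + g x)]
    ring

theorem foldl_app_singleton (f : Int → Int) (l : List Int) (acc : List Int) :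
    l.foldl (fun a i => a ++ [f i]) acc = acc ++ l.map f := by
  induction l generalizing acc with
  | nil => simp
  | cons x xs ih => simp [ih]

theorem UFO_eq_alt (N : Int) (data : List Int) (octal : Bool) :
    UFO N data octal = UFO_alt N data octal := by
  unfold UFO UFO_alt reread
  rw [foldl_app_singleton]
  simp only [List.nil_append]
  exact List.map_congr_left (fun i _ => sumA_eq_horner _ _ _)

-- ===== VERDICT (by name: the statement is the Claim_ definition above) =====
theorem UFO_spec : Claim_equal_UFO := by
  intro N data octal _ _
  exact UFO_eq_alt N data octal
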